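-- pv_equiv track=rewrite | github.com/Levy-Naibei/algorithm-challenges | hackerank/beautiful_pairs.py | beautiful_pairs
-- ===== SOURCE A (Python) =====
-- def beautiful_pairs(A, B):
--     count_b = {}
--     common_numbers = 0
--     for num in B:
--         count_b[num] = count_b.get(num, 0) + 1
--     for num in A:
--         if num in count_b and count_b[num] > 0:
--             common_numbers += 1
--             count_b[num] -= 1
--
--     # If there is at least one common element,
--     # we can change one element in A to maximize the beautiful pairs
--     if common_numbers < len(A):
--         return common_numbers + 1
--     # If all elements are common, we must change one element
--     # in A to keep the beautiful pairs pairwise disjoint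
--     else:
--         return common_numbers - 1
-- ===== SOURCE B (Python) =====
-- def beautiful_pairs(A, B):
--     # Frequency tables of both inputs; common = multiset-intersection size
--     # (sum over distinct keys of per-key minima), then the same final adjustment.
--     ca = {}
--     for x in A:
--         ca[x] = ca.get(x, 0) + 1
--     cb = {}
--     for x in B:
--         cb[x] = cb.get(x, 0) + 1
--     common = sum(min(c, cb.get(x, 0)) for x, c in ca.items())
--     return common + 1 if common < len(A) else common - 1
-- ===== Notes on version B (the rewrite author's own statement) =====
-- stated objective: idiomatic
-- what changed: Instead of scanning A while destructively decrementing a frequency table of B, B builds frequency tables of both lists once and computes the common count as the sum over distinct keys of per-key minima (multiset intersection size), keeping the final +1/-1 adjustment.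
import Mathlib
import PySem

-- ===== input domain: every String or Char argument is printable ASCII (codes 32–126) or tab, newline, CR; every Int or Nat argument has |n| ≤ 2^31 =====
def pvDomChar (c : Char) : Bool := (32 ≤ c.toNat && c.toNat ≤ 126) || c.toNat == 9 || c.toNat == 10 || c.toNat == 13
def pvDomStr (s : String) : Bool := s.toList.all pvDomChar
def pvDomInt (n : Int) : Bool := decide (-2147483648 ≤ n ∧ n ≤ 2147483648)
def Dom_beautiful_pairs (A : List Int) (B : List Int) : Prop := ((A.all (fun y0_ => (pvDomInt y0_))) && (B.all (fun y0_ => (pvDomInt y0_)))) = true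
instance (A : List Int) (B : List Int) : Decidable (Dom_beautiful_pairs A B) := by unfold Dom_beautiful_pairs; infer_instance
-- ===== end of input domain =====

-- B replaces A's destructive scan of a B-frequency table by two frequency tables
-- and a sum of per-key minima (multiset-intersection size); same cost, more idiomatic.


-- ===== PORT A =====
-- one step of A's loop over A: `if num in count_b and count_b[num] > 0: common += 1; count_b[num] -= 1`
-- (`count_b[num]` is read under the `num in count_b` guard, so `getD` is exact here)
def pvStepA (s : PySem.Dict Int Int × Int) (num : Int) : PySem.Dict Int Int × Int :=
  if s.1.contains num && decide (0 < s.1.getD num 0) then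
    (s.1.insert num (s.1.getD num 0 - 1), s.2 + 1)
  else s

def beautiful_pairs (A : List Int) (B : List Int) : Int :=
  let count_b := B.foldl (fun d num => d.insert num (d.getD num 0 + 1)) PySem.Dict.empty
  let common := (A.foldl pvStepA (count_b, 0)).2
  if common < (A.length : Int) then common + 1 else common - 1

-- ===== PORT B =====
def beautiful_pairs_alt (A : List Int) (B : List Int) : Int :=
  let ca := A.foldl (fun d x => d.insert x (d.getD x 0 + 1)) PySem.Dict.empty
  let cb := B.foldl (fun d x => d.insert x (d.getD x 0 + 1)) PySem.Dict.empty
  let common := ca.items.foldl (fun acc p => acc + min p.2 (cb.getD p.1 0)) 0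
  if common < (A.length : Int) then common + 1 else common - 1

-- ===== PRECONDITION & SPEC =====
def Spec_beautiful_pairs (A : List Int) (B : List Int) (out : Int) : Prop := out = beautiful_pairs_alt A B
instance (A : List Int) (B : List Int) (out : Int) : Decidable (Spec_beautiful_pairs A B out) := by unfold Spec_beautiful_pairs; infer_instance

-- ===== CLAIM (what is proved, stated in full; the proofs are below) =====
def Claim_equal_beautiful_pairs : Prop := ∀ (A : List Int) (B : List Int), Dom_beautiful_pairs A B → Spec_beautiful_pairs A B (beautiful_pairs A B)

-- ===== LEMMAS AND PROOFS =====

-- the `num in count_b` guard is redundant: a missing key reads as the default 0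
theorem pvStepA_eq (d : PySem.Dict Int Int) (c num : Int) :
    pvStepA (d, c) num =
      if 0 < d.getD num 0 then (d.insert num (d.getD num 0 - 1), c + 1) else (d, c) := by
  unfold pvStepA
  by_cases h : d.contains num = true
  · simp [h]
  · have h0 : d.getD num 0 = 0 :=
      PySem.Dict.getD_of_not_contains d 0 (by simpa using h)
    simp [h, h0]

-- A's loop counts the size of the multiset intersection of A with the multiset m
-- represented by the dict d
theorem loopA (A : List Int) (d : PySem.Dict Int Int) (m : Multiset Int) (c : Int)
    (h : ∀ x, d.getD x 0 = (m.count x : Int)) :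
    (A.foldl pvStepA (d, c)).2 = c + (((A : Multiset Int)) ∩ m).card := by
  induction A generalizing d m c with
  | nil => simp
  | cons a rest ih =>
    rw [List.foldl_cons, pvStepA_eq]
    by_cases hp : 0 < d.getD a 0
    · have hm : a ∈ m := by
        rw [h a] at hp
        exact Multiset.count_pos.mp (by exact_mod_cast hp)
      have h' : ∀ x, (d.insert a (d.getD a 0 - 1)).getD x 0 = ((m.erase a).count x : Int) := by
        intro x
        rw [PySem.Dict.getD_insert]
        by_cases hx : x = a
        · subst hx
          have : (m.erase x).count x = m.count x - 1 := Multiset.count_erase_self x m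
          rw [if_pos rfl, this, h x]
          have hpos : 1 ≤ m.count x := Multiset.one_le_count_iff_mem.mpr hm
          push_cast [Nat.cast_sub hpos]
          ring
        · rw [if_neg hx, h x, Multiset.count_erase_of_ne hx]
      rw [if_pos hp, ih _ _ _ h']
      have : ((a ::ₘ (rest : Multiset Int)) ∩ m) = a ::ₘ ((rest : Multiset Int) ∩ m.erase a) :=
        Multiset.cons_inter_of_pos _ hm
      have hco : ((a :: rest : List Int) : Multiset Int) = a ::ₘ (rest : Multiset Int) := rfl
      rw [hco, this, Multiset.card_cons]
      push_cast
      ring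
    · have hm : a ∉ m := by
        intro hmem
        apply hp
        rw [h a]
        exact_mod_cast Multiset.count_pos.mpr hmem
      rw [if_neg hp, ih _ _ _ h]
      have : ((a ::ₘ (rest : Multiset Int)) ∩ m) = (rest : Multiset Int) ∩ m :=
        Multiset.cons_inter_of_neg _ hm
      have hco : ((a :: rest : List Int) : Multiset Int) = a ::ₘ (rest : Multiset Int) := rfl
      rw [hco, this]

theorem foldl_add_f (f : Int × Int → Int) (l : List (Int × Int)) (c : Int) :
    l.foldl (fun acc p => acc + f p) c = c + (l.map f).sum := by
  induction l generalizing c with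
  | nil => simp
  | cons p rest ih => simp [ih]; ring

theorem sum_map_cast (f : Int → ℕ) (l : List Int) :
    (l.map (fun x => ((f x : ℕ) : Int))).sum = (((l.map f).sum : ℕ) : Int) := by
  induction l with
  | nil => simp
  | cons x rest ih => simp [ih]

-- sum over a nodup list covering A's support of per-key minima = |↑A ∩ ↑B|
theorem sum_min_card (A B l : List Int) (hn : l.Nodup) (hc : ∀ x ∈ A, x ∈ l) :
    (l.map (fun x => min (A.count x) (B.count x))).sum
      = ((A : Multiset Int) ∩ (B : Multiset Int)).card := by
  have hcount : ∀ x : Int, min (A.count x) (B.count x)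
      = ((A : Multiset Int) ∩ (B : Multiset Int)).count x := by
    intro x; rw [Multiset.count_inter]; simp
  calc (l.map (fun x => min (A.count x) (B.count x))).sum
      = (l.map (fun x => ((A : Multiset Int) ∩ (B : Multiset Int)).count x)).sum := by
        simp only [hcount]
    _ = ∑ x ∈ l.toFinset, ((A : Multiset Int) ∩ (B : Multiset Int)).count x := by
        rw [List.sum_toFinset _ hn]
    _ = ∑ x ∈ ((A : Multiset Int) ∩ (B : Multiset Int)).toFinset,
          ((A : Multiset Int) ∩ (B : Multiset Int)).count x := by
        refine (Finset.sum_subset ?_ ?_).symm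
        · intro x hx
          rw [Multiset.mem_toFinset] at hx
          rw [List.mem_toFinset]
          exact hc x (by simpa using Multiset.mem_of_le Multiset.inter_le_left hx)
        · intro x _ hx
          rw [Multiset.mem_toFinset] at hx
          exact Multiset.count_eq_zero.mpr hx
    _ = ((A : Multiset Int) ∩ (B : Multiset Int)).card :=
        Multiset.toFinset_sum_count_eq _

-- ===== VERDICT (by name: the statement is the Claim_ definition above) =====
theorem beautiful_pairs_spec : Claim_equal_beautiful_pairs := by
  intro A B _
  show beautiful_pairs A B = beautiful_pairs_alt A B
  unfold beautiful_pairs beautiful_pairs_alt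
  have hcb : ∀ x : Int,
      (B.foldl (fun d num => d.insert num (d.getD num 0 + 1)) PySem.Dict.empty).getD x 0
        = ((B : Multiset Int).count x : Int) := by
    intro x
    rw [PySem.Dict.getD_foldl_insert_add_one]
    simp
  have hA : (A.foldl pvStepA
      (B.foldl (fun d num => d.insert num (d.getD num 0 + 1)) PySem.Dict.empty, 0)).2
      = ((((A : Multiset Int)) ∩ (B : Multiset Int)).card : Int) := by
    rw [loopA A _ (B : Multiset Int) 0 hcb]; ring
  have hca : A.foldl (fun d x => d.insert x (d.getD x 0 + 1)) PySem.Dict.empty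
      = PySem.Dict.counter A := PySem.Dict.foldl_insert_getD_add_one_eq_counter A
  have hB : ((PySem.Dict.counter A).items.foldl
      (fun acc p => acc +
        min p.2 ((B.foldl (fun d x => d.insert x (d.getD x 0 + 1)) PySem.Dict.empty).getD p.1 0)) 0)
      = ((((A : Multiset Int)) ∩ (B : Multiset Int)).card : Int) := by
    rw [foldl_add_f, PySem.Dict.items_counter]
    have hmap : ((PySem.Set.ofList A).map (fun k => (k, (A.count k : Int)))).map
        (fun p => min p.2 ((B.foldl (fun d x => d.insert x (d.getD x 0 + 1)) PySem.Dict.empty).getD p.1 0))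
        = (PySem.Set.ofList A).map (fun k => ((min (A.count k) (B.count k) : ℕ) : Int)) := by
      rw [List.map_map]
      refine List.map_congr_left ?_
      intro k _
      simp only [Function.comp]
      rw [hcb k]
      push_cast
      simp
    rw [hmap, sum_map_cast, sum_min_card A B _ (PySem.Set.nodup_ofList A)
      (fun x hx => (PySem.Set.mem_ofList A x).mpr hx)]
    ring
  rw [hca] at *
  simp only [hA, hB]
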